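-- pv_equiv track=rewrite | github.com/m-aouzal/dsomm | preprocess/preprocess.py | generate_level_activities
-- ===== SOURCE A (Python) =====
-- def generate_level_activities(dsomm_data):
--     """
--     Generate a mapping of levels to activities, preserving all fields.
--     """
--     level_activities = {}
--     for entry in dsomm_data:
--         level = int(entry.get("Level", 0))
--         if level not in level_activities:
--             level_activities[level] = []
--         level_activities[level].append(entry)
--     return level_activities
-- ===== SOURCE B (Python) =====
-- def generate_level_activities(dsomm_data):
--     """
--     Generate a mapping of levels to activities, preserving all fields.
--     Two-pass: collect distinct levels in first-appearance order, then
--     build each bucket by filtering the whole list.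
--     """
--     keys = list(dict.fromkeys(int(e.get("Level", 0)) for e in dsomm_data))
--     return {k: [e for e in dsomm_data if int(e.get("Level", 0)) == k]
--             for k in keys}
-- ===== Notes on version B (the rewrite author's own statement) =====
-- stated objective: alternative
-- what changed: A does one pass dispatching each entry into a dict bucket; B first collects the distinct levels in first-appearance order (dict.fromkeys) and then builds each bucket by filtering the whole list once per level.
import Mathlib
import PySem

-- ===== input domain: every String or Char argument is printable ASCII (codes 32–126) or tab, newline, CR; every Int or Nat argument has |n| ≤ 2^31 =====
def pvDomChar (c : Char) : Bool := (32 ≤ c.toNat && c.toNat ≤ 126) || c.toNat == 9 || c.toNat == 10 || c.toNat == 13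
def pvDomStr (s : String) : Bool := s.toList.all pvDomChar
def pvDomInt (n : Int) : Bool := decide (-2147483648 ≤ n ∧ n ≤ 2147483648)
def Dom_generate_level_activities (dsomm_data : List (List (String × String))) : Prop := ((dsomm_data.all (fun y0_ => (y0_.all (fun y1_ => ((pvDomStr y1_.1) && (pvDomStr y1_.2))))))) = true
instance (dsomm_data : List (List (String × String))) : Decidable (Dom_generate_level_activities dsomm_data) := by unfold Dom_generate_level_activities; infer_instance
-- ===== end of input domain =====

-- B replaces A's single dispatch-into-buckets pass by a two-pass scheme (distinct
-- levels in first-appearance order, then one filter per level); same return value,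
-- objective: alternative decomposition, not speed.

-- shared helper: level = int(entry.get("Level", 0)); the .getD 0 is only reached
-- outside Pre_ (where the Python raises ValueError and nothing is claimed)
def pvLevel (entry : List (String × String)) : Int :=
  match (PySem.Dict.mk entry).get? "Level" with
  | some s => (PySem.Int.ofStr? s).getD 0
  | none => 0

-- ===== PORT A =====
def generate_level_activities (dsomm_data : List (List (String × String))) : List (Int × List (List (String × String))) :=
  (dsomm_data.foldl
    (fun level_activities entry =>
      let level := pvLevel entry
      let level_activities :=
        if level_activities.contains level = false then
          level_activities.insert level []
        else level_activities
      level_activities.modify level [] (fun xs => xs ++ [entry]))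
    PySem.Dict.empty).items

-- ===== PORT B =====
def generate_level_activities_alt (dsomm_data : List (List (String × String))) : List (Int × List (List (String × String))) :=
  (PySem.List.dedup (dsomm_data.map pvLevel)).map
    (fun k => (k, dsomm_data.filter (fun e => pvLevel e == k)))

-- ===== PRECONDITION & SPEC =====
-- the "Level" value of this entry, if present, parses as a Python int
def pvLevelParses (entry : List (String × String)) : Bool :=
  match (PySem.Dict.mk entry).get? "Level" with
  | some s => (PySem.Int.ofStr? s).isSome
  | none => true

-- Pre_ excludes exactly the inputs where int() raises ValueError in A (an entry
-- whose "Level" value is not an int-like string)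
def Pre_generate_level_activities (dsomm_data : List (List (String × String))) : Prop :=
  ∀ entry ∈ dsomm_data, pvLevelParses entry = true
instance (dsomm_data : List (List (String × String))) : Decidable (Pre_generate_level_activities dsomm_data) := by unfold Pre_generate_level_activities; infer_instance

def pvWitness_generate_level_activities : (List (List (String × String))) :=
  [[("Level", "1"), ("Name", "a")], [("Level", "2")], [("Level", "1")]]

def Spec_generate_level_activities (dsomm_data : List (List (String × String))) (out : List (Int × List (List (String × String)))) : Prop := out = generate_level_activities_alt dsomm_data
instance (dsomm_data : List (List (String × String))) (out : List (Int × List (List (String × String)))) : Decidable (Spec_generate_level_activities dsomm_data out) := by unfold Spec_generate_level_activities; infer_instance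

-- ===== CLAIM (what is proved, stated in full; the proofs are below) =====
def Claim_equal_generate_level_activities : Prop := ∀ (dsomm_data : List (List (String × String))), Dom_generate_level_activities dsomm_data → Pre_generate_level_activities dsomm_data → Spec_generate_level_activities dsomm_data (generate_level_activities dsomm_data)

-- ===== LEMMAS AND PROOFS =====

-- A's loop body (insert-if-absent, then append) is one Dict.modify
theorem pvStep_eq (d : PySem.Dict Int (List (List (String × String)))) (e : List (String × String)) :
    (if d.contains (pvLevel e) = false then d.insert (pvLevel e) [] else d).modify (pvLevel e) [] (fun xs => xs ++ [e])
      = d.modify (pvLevel e) [] (fun xs => xs ++ [e]) := by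
  by_cases h : d.contains (pvLevel e) = false
  · simp [h, PySem.Dict.modify, PySem.Dict.getD_insert_self,
      PySem.Dict.insert_insert_self, PySem.Dict.getD_of_not_contains _ _ h]
  · simp [h]

-- ===== VERDICT (by name: the statement is the Claim_ definition above) =====
theorem generate_level_activities_spec : Claim_equal_generate_level_activities := by
  intro l _ _
  unfold Spec_generate_level_activities generate_level_activities generate_level_activities_alt
  simp only [pvStep_eq]
  have hfold :
      l.foldl (fun d e => d.modify (pvLevel e) [] (fun xs => xs ++ [e])) PySem.Dict.empty
        = (l.map (fun e => (pvLevel e, e))).foldl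
            (fun d p => d.modify p.1 [] (fun xs => xs ++ [p.2])) PySem.Dict.empty := by
    rw [List.foldl_map]
  rw [hfold]
  have hkeys :
      ((l.map (fun e => (pvLevel e, e))).foldl
          (fun d p => d.modify p.1 [] (fun xs => xs ++ [p.2])) PySem.Dict.empty).keys
        = PySem.List.dedup (l.map pvLevel) := by
    rw [PySem.Dict.keys_foldl_modify_key _ Prod.fst [] (fun _ p => (fun xs => xs ++ [p.2]))]
    rw [PySem.List.dedup_eq_ofList]
    simp [PySem.Set.update, PySem.Set.ofList, PySem.Dict.keys_empty, PySem.Set.empty,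
      List.map_map, Function.comp_def]
  have hnodup := PySem.Dict.nodup_keys_foldl_modify_key
      (l.map (fun e => (pvLevel e, e))) Prod.fst []
      (fun _ p => (fun xs => xs ++ [p.2])) PySem.Dict.empty PySem.Dict.nodup_keys_empty
  rw [PySem.Dict.items_eq_map_keys _ hnodup [], hkeys]
  refine List.map_congr_left (fun k _ => ?_)
  rw [PySem.Dict.getD_foldl_modify_append]
  simp [PySem.Dict.getD_empty, List.filter_map, List.map_map, Function.comp_def]
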